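-- pv_equiv track=rewrite | github.com/vtran5290/0-VN-Agent-System | minervini_backtest/scripts/run_fa_hybrid_experiment.py | _ma_combo_variants
-- ===== SOURCE A (Python) =====
-- import itertools
-- from typing import Dict, List, Tuple
--
-- def _ma_combo_variants(windows: List[int]) -> List[str]:
--     """Non-empty subsets of windows => C > MA(w) for each w. With [5,10,20] => 7 variants."""
--     out: List[str] = []
--     for r in range(1, len(windows) + 1):
--         for subset in itertools.combinations(sorted(windows), r):
--             if len(subset) == 1:
--                 out.append(f"c_gt_ma{subset[0]}")
--             elif len(subset) == 3:
--                 out.append("c_gt_all")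
--             else:
--                 out.append("c_gt_ma" + "_and_ma".join(str(w) for w in subset))
--
--     return out
-- ===== SOURCE B (Python) =====
-- def _ma_combo_variants(windows):
--     """Bitmask enumeration: walk masks of sorted(windows) in decreasing order
--     (high bit = first element, so within each popcount the subsets come out in
--     lexicographic order), then emit the labels grouped by subset size."""
--     s = sorted(windows)
--     n = len(s)
--     subs = [[s[i] for i in range(n) if (m >> (n - 1 - i)) & 1]
--             for m in range((1 << n) - 1, 0, -1)]
--     out = []
--     for r in range(1, n + 1):
--         for subset in subs:
--             if len(subset) != r:
--                 continue
--             out.append("c_gt_all" if r == 3 else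
--                        "c_gt_ma" + "_and_ma".join(str(w) for w in subset))
--     return out
-- ===== Notes on version B (the rewrite author's own statement) =====
-- stated objective: alternative
-- what changed: Replaces the per-size itertools.combinations recursion by a single bitmask enumeration of all non-empty subsets of sorted(windows) (masks counted downward with the high bit mapped to the first element, which yields lexicographic order within each popcount), followed by a grouping pass per size that formats the labels.
import Mathlib
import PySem

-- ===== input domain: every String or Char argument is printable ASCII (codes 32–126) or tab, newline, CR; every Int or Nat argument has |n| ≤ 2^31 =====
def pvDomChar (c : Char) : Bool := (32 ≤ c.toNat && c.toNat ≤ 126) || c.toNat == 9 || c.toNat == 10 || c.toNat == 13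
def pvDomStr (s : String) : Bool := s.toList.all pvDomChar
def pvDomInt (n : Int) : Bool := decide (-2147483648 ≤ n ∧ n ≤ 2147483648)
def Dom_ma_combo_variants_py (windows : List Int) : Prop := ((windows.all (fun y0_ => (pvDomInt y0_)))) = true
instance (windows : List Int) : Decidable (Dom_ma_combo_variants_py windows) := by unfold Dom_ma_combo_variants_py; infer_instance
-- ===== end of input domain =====

-- B replaces the per-size combinations recursion by one bitmask enumeration of all
-- non-empty subsets plus a grouping pass per size (objective: alternative algorithm).

-- ===== PORT A =====

-- itertools.combinations(l, r): hand port (exact: tuples in lexicographic index order)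
def pyCombinations : List Int → Nat → List (List Int)
  | _, 0 => [[]]
  | [], _ + 1 => []
  | a :: t, r + 1 => (pyCombinations t r).map (a :: ·) ++ pyCombinations t (r + 1)

-- the three-way branch of A's inner loop body (subset[0] exists: the branch runs when len == 1)
def fmtA (subset : List Int) : String :=
  if PySem.List.len subset == 1 then "c_gt_ma" ++ PySem.Int.toStr (PySem.List.pyGetD subset 0 0)
  else if PySem.List.len subset == 3 then "c_gt_all"
  else "c_gt_ma" ++ PySem.Str.join "_and_ma" (subset.map PySem.Int.toStr)

def ma_combo_variants_py (windows : List Int) : List String :=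
  let out : List String := []
  -- r.toNat is exact: r ranges over 1 .. len(windows), all nonnegative
  (PySem.List.pyRange 1 (PySem.List.len windows + 1) 1).foldl
    (fun out r =>
      (pyCombinations (PySem.List.sorted windows (fun x => x) false) r.toNat).foldl
        (fun out subset => out ++ [fmtA subset]) out)
    out

-- ===== PORT B =====

-- [s[i] for i in range(n) if (m >> (n - 1 - i)) & 1]  (shift amount n-1-i ≥ 0, so .toNat is exact;
-- s[i] with 0 ≤ i < n cannot raise, ported as pyGetD)
def subsetOfMask (s : List Int) (n : Int) (m : Int) : List Int :=
  ((PySem.List.pyRange 0 n 1).filter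
      (fun i => PySem.Int.band (m >>> (n - 1 - i).toNat) 1 != 0)).map
    (fun i => PySem.List.pyGetD s i 0)

def fmtB (r : Int) (subset : List Int) : String :=
  if r == 3 then "c_gt_all"
  else "c_gt_ma" ++ PySem.Str.join "_and_ma" (subset.map PySem.Int.toStr)

def ma_combo_variants_py_alt (windows : List Int) : List String :=
  let s := PySem.List.sorted windows (fun x => x) false
  let n := PySem.List.len s
  -- 1 << n with n = len(s) ≥ 0: .toNat is exact
  let subs := (PySem.List.pyRange (((1 : Int) <<< n.toNat) - 1) 0 (-1)).map (subsetOfMask s n)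
  let out : List String := []
  (PySem.List.pyRange 1 (n + 1) 1).foldl
    (fun out r =>
      subs.foldl
        (fun out subset =>
          if PySem.List.len subset != r then out else out ++ [fmtB r subset]) out)
    out

-- ===== PRECONDITION & SPEC =====
def Spec_ma_combo_variants_py (windows : List Int) (out : List String) : Prop := out = ma_combo_variants_py_alt windows
instance (windows : List Int) (out : List String) : Decidable (Spec_ma_combo_variants_py windows out) := by unfold Spec_ma_combo_variants_py; infer_instance

-- ===== CLAIM (what is proved, stated in full; the proofs are below) =====
def Claim_equal_ma_combo_variants_py : Prop := ∀ (windows : List Int), Dom_ma_combo_variants_py windows → Spec_ma_combo_variants_py windows (ma_combo_variants_py windows)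

-- ===== LEMMAS AND PROOFS =====

-- all subsets of s, in the order B's descending-mask scan produces them (empty subset last)
def subsAll : List Int → List (List Int)
  | [] => [[]]
  | a :: t => (subsAll t).map (a :: ·) ++ subsAll t

lemma length_mem_pyCombinations : ∀ (s : List Int) (k : Nat), ∀ u ∈ pyCombinations s k, u.length = k := by
  intro s
  induction s with
  | nil => intro k u hu; cases k <;> simp_all [pyCombinations]
  | cons a t ih =>
    intro k u hu
    cases k with
    | zero => simp_all [pyCombinations]
    | succ k =>
      simp only [pyCombinations, List.mem_append, List.mem_map] at hu
      rcases hu with ⟨v, hv, rfl⟩ | hu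
      · simp [ih k v hv]
      · exact ih (k + 1) u hu

lemma filter_subsAll : ∀ (s : List Int) (k : Nat),
    (subsAll s).filter (fun u => u.length == k) = pyCombinations s k := by
  intro s
  induction s with
  | nil =>
    intro k
    cases k <;> simp [subsAll, pyCombinations]
  | cons a t ih =>
    intro k
    simp only [subsAll, List.filter_append, List.filter_map]
    cases k with
    | zero =>
      have h1 : ((subsAll t).filter ((fun u => u.length == 0) ∘ (a :: ·))) = [] := by
        simp [Function.comp]
      rw [h1, ih 0]
      simp [pyCombinations]
    | succ k =>
      have h1 : ((fun u : List Int => u.length == k + 1) ∘ (a :: ·)) = fun u => u.length == k := by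
        funext u; simp [Function.comp]
      rw [h1, ih k, ih (k + 1)]
      rfl

lemma foldl_append_singleton {α β : Type} (f : α → β) :
    ∀ (l : List α) (init : List β),
      l.foldl (fun o x => o ++ [f x]) init = init ++ l.map f := by
  intro l
  induction l with
  | nil => simp
  | cons x xs ih => intro init; simp [ih]

lemma foldl_skip_append {α β : Type} (p : α → Bool) (f : α → β) :
    ∀ (l : List α) (init : List β),
      l.foldl (fun o x => if p x then o else o ++ [f x]) init
        = init ++ (l.filter (fun x => !p x)).map f := by
  intro l
  induction l with
  | nil => simp
  | cons x xs ih =>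
    intro init
    by_cases h : p x = true <;> simp [h, ih]

lemma foldl_append_flat {β : Type} (g : Int → List β) :
    ∀ (L : List Int) (init : List β),
      L.foldl (fun o r => o ++ g r) init = init ++ L.flatMap g := by
  intro L
  induction L with
  | nil => simp
  | cons r rs ih => intro init; simp [ih]

lemma flatMap_congr_mem {β : Type} (L : List Int) (g1 g2 : Int → List β)
    (h : ∀ r ∈ L, g1 r = g2 r) : L.flatMap g1 = L.flatMap g2 := by
  induction L with
  | nil => rfl
  | cons r rs ih =>
    simp only [List.flatMap_cons]
    rw [h r (by simp), ih (fun x hx => h x (by simp [hx]))]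

-- bit tests, reduced to Nat arithmetic
lemma shift_band_high (n m : Nat) (hm : m < 2 ^ n) :
    PySem.Int.band (((2 ^ n + m : Nat) : Int) >>> n) 1 = 1 := by
  have h1 : ((2 ^ n + m : Nat) : Int) >>> n = (((2 ^ n + m) >>> n : Nat) : Int) := by simp
  have hpos : 0 < 2 ^ n := by positivity
  have h2 : (2 ^ n + m) >>> n = 1 := by
    rw [Nat.shiftRight_eq_div_pow, Nat.add_div_of_dvd_right (dvd_refl _),
      Nat.div_self hpos, Nat.div_eq_of_lt hm]
  rw [h1, h2]; decide

lemma shift_band_low (n m : Nat) (hm : m < 2 ^ n) :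
    PySem.Int.band ((m : Int) >>> n) 1 = 0 := by
  have h1 : ((m : Nat) : Int) >>> n = ((m >>> n : Nat) : Int) := by simp
  rw [h1, Nat.shiftRight_eq_div_pow, Nat.div_eq_of_lt hm]; decide

lemma shift_band_add_pow (n m k : Nat) (hk : k < n) :
    PySem.Int.band (((2 ^ n + m : Nat) : Int) >>> k) 1
      = PySem.Int.band ((m : Int) >>> k) 1 := by
  have h1 : ((2 ^ n + m : Nat) : Int) >>> k = (((2 ^ n + m) >>> k : Nat) : Int) := by simp
  have h2 : ((m : Nat) : Int) >>> k = ((m >>> k : Nat) : Int) := by simp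
  rw [h1, h2]
  rw [show (1 : Int) = ((1 : Nat) : Int) from rfl, PySem.Int.band_natCast, PySem.Int.band_natCast]
  congr 1
  rw [Nat.and_one_is_mod, Nat.and_one_is_mod, Nat.shiftRight_eq_div_pow, Nat.shiftRight_eq_div_pow]
  have hdvd : 2 ^ k ∣ 2 ^ n := pow_dvd_pow 2 (le_of_lt hk)
  rw [Nat.add_div_of_dvd_right hdvd]
  have h3 : 2 ^ n / 2 ^ k = 2 ^ (n - k) := Nat.pow_div (le_of_lt hk) (by norm_num)
  have h4 : 2 ^ (n - k) = 2 * 2 ^ (n - k - 1) := by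
    rw [← pow_succ']
    congr 1
    omega
  rw [h3, h4]
  omega

lemma pyRange_shift (n : Nat) (c : Int) :
    PySem.List.pyRange c (c + (n : Int)) 1 = (PySem.List.pyRange 0 (n : Int) 1).map (c + ·) := by
  rw [PySem.List.pyRange_one, PySem.List.pyRange_one]
  simp [List.map_map, Function.comp]

lemma pyGetD_cons_shift (a : Int) (t : List Int) (j : Int) (hj : 0 ≤ j) :
    PySem.List.pyGetD (a :: t) (1 + j) 0 = PySem.List.pyGetD t j 0 := by
  rw [show j = ((j.toNat : Nat) : Int) by omega,
    show (1 + ((j.toNat : Nat) : Int)) = ((j.toNat + 1 : Nat) : Int) by push_cast; ring,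
    PySem.List.pyGetD_natCast, PySem.List.pyGetD_natCast, List.getD_cons_succ]

lemma pyGetD_cons_zero (a : Int) (t : List Int) :
    PySem.List.pyGetD (a :: t) 0 0 = a := by
  rw [show (0 : Int) = ((0 : Nat) : Int) from rfl, PySem.List.pyGetD_natCast]
  rfl

lemma tail_step (t : List Int) (a : Int) (P P' : Int → Bool)
    (hP : ∀ j : Int, 0 ≤ j → j < (t.length : Int) → P (1 + j) = P' j) :
    (((PySem.List.pyRange 0 (t.length : Int) 1).map (1 + ·)).filter P).map
        (fun i => PySem.List.pyGetD (a :: t) i 0)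
      = ((PySem.List.pyRange 0 (t.length : Int) 1).filter P').map
          (fun i => PySem.List.pyGetD t i 0) := by
  rw [List.filter_map, List.map_map]
  have hfc : (PySem.List.pyRange 0 (t.length : Int) 1).filter (P ∘ (1 + ·))
      = (PySem.List.pyRange 0 (t.length : Int) 1).filter P' :=
    List.filter_congr (fun j hj => by
      rw [PySem.List.mem_pyRange_one] at hj
      show P (1 + j) = P' j
      exact hP j hj.1 hj.2)
  rw [hfc]
  exact List.map_congr_left (fun j hj => by
    have hj' := (PySem.List.mem_pyRange_one).mp (List.mem_of_mem_filter hj)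
    exact pyGetD_cons_shift a t j hj'.1)

lemma subsetOfMask_high (a : Int) (t : List Int) (m : Nat) (hm : m < 2 ^ t.length) :
    subsetOfMask (a :: t) (PySem.List.len (a :: t)) ((2 ^ t.length + m : Nat) : Int)
      = a :: subsetOfMask t (PySem.List.len t) (m : Int) := by
  unfold subsetOfMask
  simp only [PySem.List.len_eq, List.length_cons]
  rw [show ((t.length + 1 : Nat) : Int) = 1 + (t.length : Int) by push_cast; ring]
  rw [PySem.List.pyRange_one_cons (by positivity)]
  simp only [zero_add]
  rw [pyRange_shift t.length 1]
  have hc : (PySem.Int.band (((2 ^ t.length + m : Nat) : Int) >>> (1 + (t.length : Int) - 1 - 0).toNat) 1 != 0) = true := by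
    rw [show (1 + (t.length : Int) - 1 - 0) = ((t.length : Nat) : Int) by ring,
      Int.toNat_natCast, shift_band_high t.length m hm]
    rfl
  simp only [List.filter_cons, hc, if_true, List.map_cons]
  rw [pyGetD_cons_zero]
  congr 1
  exact tail_step t a _ _ (fun j h0 hlt => by
    show (PySem.Int.band (((2 ^ t.length + m : Nat) : Int) >>> (1 + (t.length : Int) - 1 - (1 + j)).toNat) 1 != 0)
        = (PySem.Int.band ((m : Int) >>> ((t.length : Int) - 1 - j).toNat) 1 != 0)
    rw [show (1 + (t.length : Int) - 1 - (1 + j)) = (t.length : Int) - 1 - j by ring,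
      shift_band_add_pow t.length m _ (by omega)])

lemma subsetOfMask_low (a : Int) (t : List Int) (m : Nat) (hm : m < 2 ^ t.length) :
    subsetOfMask (a :: t) (PySem.List.len (a :: t)) (m : Int)
      = subsetOfMask t (PySem.List.len t) (m : Int) := by
  unfold subsetOfMask
  simp only [PySem.List.len_eq, List.length_cons]
  rw [show ((t.length + 1 : Nat) : Int) = 1 + (t.length : Int) by push_cast; ring]
  rw [PySem.List.pyRange_one_cons (by positivity)]
  simp only [zero_add]
  rw [pyRange_shift t.length 1]
  have hc : (PySem.Int.band (((m : Nat) : Int) >>> (1 + (t.length : Int) - 1 - 0).toNat) 1 != 0) = false := by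
    rw [show (1 + (t.length : Int) - 1 - 0) = ((t.length : Nat) : Int) by ring,
      Int.toNat_natCast, shift_band_low t.length m hm]
    rfl
  simp only [List.filter_cons, hc, if_false, Bool.false_eq_true]
  exact tail_step t a _ _ (fun j h0 hlt => by
    show (PySem.Int.band ((m : Int) >>> (1 + (t.length : Int) - 1 - (1 + j)).toNat) 1 != 0)
        = (PySem.Int.band ((m : Int) >>> ((t.length : Int) - 1 - j).toNat) 1 != 0)
    rw [show (1 + (t.length : Int) - 1 - (1 + j)) = (t.length : Int) - 1 - j by ring])

lemma subsetOfMask_zero (s : List Int) (nn : Int) : subsetOfMask s nn 0 = [] := by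
  unfold subsetOfMask
  have hb : PySem.Int.band (0 : Int) 1 = 0 := by decide
  simp [hb]

lemma range_rev (N : Nat) :
    PySem.List.pyRange ((N : Int) - 1) (-1) (-1) = (PySem.List.pyRange 0 (N : Int) 1).reverse := by
  rw [PySem.List.pyRange_neg_one_eq_reverse]
  norm_num

lemma range_rev' (N : Nat) :
    PySem.List.pyRange ((N : Int) - 1) 0 (-1) = (PySem.List.pyRange 1 (N : Int) 1).reverse := by
  rw [PySem.List.pyRange_neg_one_eq_reverse]
  norm_num

-- the descending-mask scan (mask 0 included) produces exactly subsAll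
lemma key_subsAll : ∀ (s : List Int),
    (PySem.List.pyRange (((2 ^ s.length : Nat) : Int) - 1) (-1) (-1)).map
        (subsetOfMask s (PySem.List.len s)) = subsAll s := by
  intro s
  induction s with
  | nil => rfl
  | cons a t ih =>
    rw [range_rev] at ih ⊢
    simp only [List.length_cons] at ih ⊢
    rw [show (((2 ^ (t.length + 1) : Nat) : Int)) = ((2 ^ t.length : Nat) : Int) + ((2 ^ t.length : Nat) : Int) by push_cast; ring]
    rw [PySem.List.pyRange_one_append 0 ((2 ^ t.length : Nat) : Int)
        (((2 ^ t.length : Nat) : Int) + ((2 ^ t.length : Nat) : Int)) (by positivity)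
        (by have : (0:Int) ≤ ((2 ^ t.length : Nat) : Int) := by positivity
            linarith)]
    rw [pyRange_shift (2 ^ t.length) ((2 ^ t.length : Nat) : Int)]
    rw [List.reverse_append, List.map_append, ← List.map_reverse, List.map_map]
    have e1 : (PySem.List.pyRange 0 ((2 ^ t.length : Nat) : Int) 1).reverse.map
        ((subsetOfMask (a :: t) (PySem.List.len (a :: t))) ∘ (((2 ^ t.length : Nat) : Int) + ·))
        = (PySem.List.pyRange 0 ((2 ^ t.length : Nat) : Int) 1).reverse.map
            ((a :: ·) ∘ subsetOfMask t (PySem.List.len t)) :=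
      List.map_congr_left (fun x hx => by
        rw [List.mem_reverse, PySem.List.mem_pyRange_one] at hx
        have hlt : x.toNat < 2 ^ t.length := by omega
        show subsetOfMask (a :: t) (PySem.List.len (a :: t)) (((2 ^ t.length : Nat) : Int) + x)
            = a :: subsetOfMask t (PySem.List.len t) x
        rw [show x = ((x.toNat : Nat) : Int) by omega,
          show (((2 ^ t.length : Nat) : Int) + ((x.toNat : Nat) : Int)) = ((2 ^ t.length + x.toNat : Nat) : Int) by push_cast; ring]
        exact subsetOfMask_high a t x.toNat hlt)
    have e2 : (PySem.List.pyRange 0 ((2 ^ t.length : Nat) : Int) 1).reverse.map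
        (subsetOfMask (a :: t) (PySem.List.len (a :: t)))
        = (PySem.List.pyRange 0 ((2 ^ t.length : Nat) : Int) 1).reverse.map
            (subsetOfMask t (PySem.List.len t)) :=
      List.map_congr_left (fun x hx => by
        rw [List.mem_reverse, PySem.List.mem_pyRange_one] at hx
        have hlt : x.toNat < 2 ^ t.length := by omega
        rw [show x = ((x.toNat : Nat) : Int) by omega]
        exact subsetOfMask_low a t x.toNat hlt)
    rw [e1, e2, ← List.map_map, ih]
    rfl

lemma join_singleton_str (y : String) : PySem.Str.join "_and_ma" [y] = y := by
  apply String.toList_inj.mp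
  simp [PySem.Chars.join_singleton]

lemma fmt_eq (r : Int) (hr : 1 ≤ r) (u : List Int) (h : (u.length : Int) = r) :
    fmtA u = fmtB r u := by
  unfold fmtA fmtB
  rw [PySem.List.len_eq, h]
  by_cases h1 : r = 1
  · subst h1
    obtain ⟨x, rfl⟩ := List.length_eq_one_iff.mp (by exact_mod_cast h)
    have e1 : ((1 : Int) == 1) = true := rfl
    have e3 : ((1 : Int) == 3) = false := rfl
    simp only [e1, e3, if_true, if_false, Bool.false_eq_true]
    rw [pyGetD_cons_zero, List.map_cons, List.map_nil, join_singleton_str]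
  · by_cases h3 : r = 3
    · subst h3
      have e1 : ((3 : Int) == 1) = false := rfl
      have e3 : ((3 : Int) == 3) = true := rfl
      simp only [e1, e3, if_true, if_false, Bool.false_eq_true]
    · have e1 : (r == 1) = false := by simp [h1]
      have e3 : (r == 3) = false := by simp [h3]
      simp only [e1, e3, if_false, Bool.false_eq_true]

theorem ma_combo_variants_py_spec_aux : ∀ (windows : List Int),
    ma_combo_variants_py windows = ma_combo_variants_py_alt windows := by
  intro windows
  unfold ma_combo_variants_py ma_combo_variants_py_alt
  have hlen : PySem.List.len windows = PySem.List.len (PySem.List.sorted windows (fun x => x) false) := by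
    simp [PySem.List.len_eq, PySem.List.length_sorted]
  rw [hlen]
  set S := PySem.List.sorted windows (fun x => x) false with hS
  simp only [foldl_append_singleton, foldl_skip_append, foldl_append_flat, List.nil_append]
  apply flatMap_congr_mem
  intro r hr
  rw [PySem.List.mem_pyRange_one] at hr
  have hshift : ((1 : Int) <<< (PySem.List.len S).toNat) = ((2 ^ S.length : Nat) : Int) := by
    simp [PySem.List.len_eq, Int.shiftLeft_eq]
  rw [hshift, range_rev']
  have hkey := key_subsAll S
  obtain ⟨hr1, hr2⟩ := hr
  rw [range_rev, PySem.List.pyRange_one_cons (show (0:Int) < ((2 ^ S.length : Nat) : Int) by positivity)] at hkey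
  simp only [zero_add, List.reverse_cons, List.map_append, List.map_cons, List.map_nil,
    subsetOfMask_zero] at hkey
  have hfil : (((PySem.List.pyRange 1 ((2 ^ S.length : Nat) : Int) 1).reverse.map
        (subsetOfMask S (PySem.List.len S))).filter (fun u => !(PySem.List.len u != r)))
      = (subsAll S).filter (fun u => !(PySem.List.len u != r)) := by
    rw [← hkey, List.filter_append]
    have hne : ¬ ((0 : Int) = r) := by omega
    simp [PySem.List.len_eq, bne, hne]
  rw [hfil]
  have hpred : ∀ u ∈ subsAll S, (!(PySem.List.len u != r)) = (u.length == r.toNat) := by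
    intro u _
    apply Bool.eq_iff_iff.mpr
    simp [PySem.List.len_eq, bne]
    omega
  rw [List.filter_congr hpred, filter_subsAll S r.toNat]
  apply List.map_congr_left
  intro u hu
  have hlu := length_mem_pyCombinations S r.toNat u hu
  exact fmt_eq r hr1 u (by rw [hlu]; omega)

-- ===== VERDICT (by name: the statement is the Claim_ definition above) =====
theorem ma_combo_variants_py_spec : Claim_equal_ma_combo_variants_py := by
  intro windows _
  unfold Spec_ma_combo_variants_py
  exact ma_combo_variants_py_spec_aux windows
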